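-- pv_equiv track=rewrite | github.com/Piotr-Majda/python_traning | validate_brackets/validate_brackets.py | validate_brackets
-- ===== SOURCE A (Python) =====
-- from collections import deque
--
-- def validate_brackets(s: str) -> bool:
--     if not s:
--         return True
--
--     brackets = {'(': ')', "[": "]", "{": "}"}
--     stack = deque()
--     for c in s:
--         if c in brackets:
--             stack.append(brackets.get(c))
--         elif c in brackets.values():
--             if not stack or c != stack.pop():
--                 return False
--         else:
--             continue
--
--     return not stack
-- ===== SOURCE B (Python) =====
-- def _remove_pairs(t):
--     out = []
--     i = 0
--     while i < len(t):
--         if i + 1 < len(t) and t[i] + t[i + 1] in ('()', '[]', '{}'):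
--             i += 2
--         else:
--             out.append(t[i])
--             i += 1
--     return out
--
--
-- def validate_brackets(s: str) -> bool:
--     t = [c for c in s if c in '()[]{}']
--     while True:
--         u = _remove_pairs(t)
--         if len(u) < len(t):
--             t = u
--         else:
--             return not t
-- ===== Notes on version B (the rewrite author's own statement) =====
-- stated objective: alternative
-- what changed: Replaces the stack-based single scan by pair-elimination: filter to bracket characters, then repeatedly delete adjacent matching pairs '()', '[]', '{}' until a fixed point, and return whether the residue is empty.
import Mathlib
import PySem

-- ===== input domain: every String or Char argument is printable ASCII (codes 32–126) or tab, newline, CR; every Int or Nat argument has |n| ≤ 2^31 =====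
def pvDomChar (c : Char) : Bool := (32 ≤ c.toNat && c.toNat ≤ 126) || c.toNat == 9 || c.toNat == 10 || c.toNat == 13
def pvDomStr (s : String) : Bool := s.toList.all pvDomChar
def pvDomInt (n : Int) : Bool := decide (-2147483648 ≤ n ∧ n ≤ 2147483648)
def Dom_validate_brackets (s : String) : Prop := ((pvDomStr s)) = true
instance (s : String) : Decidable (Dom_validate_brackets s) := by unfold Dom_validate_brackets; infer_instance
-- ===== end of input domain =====

-- B replaces A's stack scan by repeated elimination of adjacent matching bracket pairs (alternative decomposition, same return value).


-- ===== PORT A =====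
-- c in brackets (the keys '(' '[' '{')
def pvIsOpen (c : Char) : Bool := c = '(' || c = '[' || c = '{'
-- brackets.get(c): the matching closer of an opener
def pvCloser (c : Char) : Char := if c = '(' then ')' else if c = '[' then ']' else '}'
-- c in brackets.values()
def pvIsClose (c : Char) : Bool := c = ')' || c = ']' || c = '}'

-- the for-loop of A; the stack is kept top-first (push = cons, pop = head, same LIFO order as deque append/pop)
def pvGoA : List Char → List Char → Bool
  | [], stack => stack.isEmpty
  | c :: rest, stack =>
    if pvIsOpen c then pvGoA rest (pvCloser c :: stack)
    else if pvIsClose c then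
      match stack with
      | [] => false
      | top :: stack' => if c = top then pvGoA rest stack' else false
    else pvGoA rest stack

def validate_brackets (s : String) : Bool :=
  if s = "" then true else pvGoA s.toList []

-- ===== PORT B =====
def pvIsBracket (c : Char) : Bool :=
  c = '(' || c = ')' || c = '[' || c = ']' || c = '{' || c = '}'

-- t[i] + t[i+1] in ('()', '[]', '{}')
def pvIsPair (a b : Char) : Bool :=
  (a = '(' && b = ')') || (a = '[' && b = ']') || (a = '{' && b = '}')

-- _remove_pairs: one left-to-right pass deleting adjacent matching pairs
def pvRemovePairs : List Char → List Char
  | [] => []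
  | [c] => [c]
  | a :: b :: rest =>
    if pvIsPair a b then pvRemovePairs rest else a :: pvRemovePairs (b :: rest)

-- the while loop of B
def pvReduce (t : List Char) : Bool :=
  if _h : (pvRemovePairs t).length < t.length then pvReduce (pvRemovePairs t)
  else t.isEmpty
termination_by t.length

def validate_brackets_alt (s : String) : Bool :=
  pvReduce (s.toList.filter pvIsBracket)

-- ===== PRECONDITION & SPEC =====
def Spec_validate_brackets (s : String) (out : Bool) : Prop := out = validate_brackets_alt s
instance (s : String) (out : Bool) : Decidable (Spec_validate_brackets s out) := by unfold Spec_validate_brackets; infer_instance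

-- ===== CLAIM (what is proved, stated in full; the proofs are below) =====
def Claim_equal_validate_brackets : Prop := ∀ (s : String), Dom_validate_brackets s → Spec_validate_brackets s (validate_brackets s)

-- ===== LEMMAS AND PROOFS =====

theorem pvRemovePairs_length_le (t : List Char) : (pvRemovePairs t).length ≤ t.length := by
  induction t using pvRemovePairs.induct with
  | case1 => simp [pvRemovePairs]
  | case2 => simp [pvRemovePairs]
  | case3 a b rest h ih =>
      simp only [pvRemovePairs, if_pos h]
      simp at ih ⊢; omega
  | case4 a b rest h ih =>
      simp only [pvRemovePairs, if_neg h]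
      simp at ih ⊢; omega

theorem pvRemovePairs_eq_of_length (t : List Char)
    (h : ¬ (pvRemovePairs t).length < t.length) : pvRemovePairs t = t := by
  induction t using pvRemovePairs.induct with
  | case1 => simp [pvRemovePairs]
  | case2 => simp [pvRemovePairs]
  | case3 a b rest hp ih =>
      exfalso
      have := pvRemovePairs_length_le rest
      simp only [pvRemovePairs, if_pos hp] at h
      simp at h; omega
  | case4 a b rest hp ih =>
      simp only [pvRemovePairs, if_neg hp] at h ⊢
      have := pvRemovePairs_length_le (b :: rest)
      simp at h this
      have := ih (by simp; omega)
      rw [this]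

theorem pvIsPair_facts {a b : Char} (h : pvIsPair a b = true) :
    pvIsOpen a = true ∧ pvIsClose b = true ∧ pvCloser a = b := by
  simp only [pvIsPair, Bool.or_eq_true, Bool.and_eq_true, decide_eq_true_eq] at h
  rcases h with (⟨rfl, rfl⟩ | ⟨rfl, rfl⟩) | ⟨rfl, rfl⟩ <;> refine ⟨by decide, by decide, by decide⟩

theorem pvClose_not_open {b : Char} (h : pvIsClose b = true) : pvIsOpen b = false := by
  simp only [pvIsClose, Bool.or_eq_true, decide_eq_true_eq] at h
  rcases h with (h | h) | h <;> subst h <;> decide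

theorem pvGoA_removePairs (t : List Char) : ∀ st, pvGoA (pvRemovePairs t) st = pvGoA t st := by
  induction t using pvRemovePairs.induct with
  | case1 => intro st; rfl
  | case2 => intro st; rfl
  | case3 a b rest hp ih =>
      intro st
      obtain ⟨ho, hc, he⟩ := pvIsPair_facts hp
      simp only [pvRemovePairs, if_pos hp, ih]
      simp [pvGoA, ho, hc, he, pvClose_not_open hc]
  | case4 a b rest hp ih =>
      intro st
      simp only [pvRemovePairs, if_neg hp]
      by_cases ho : pvIsOpen a = true
      · simp [pvGoA, ho, ih]
      · by_cases hc : pvIsClose a = true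
        · cases st with
          | nil => simp [pvGoA, ho, hc]
          | cons top st' =>
              by_cases he : a = top <;> simp [pvGoA, ho, hc, he, ih]
        · simp [pvGoA, ho, hc, ih]

theorem pvGoA_filter (t : List Char) : ∀ st, pvGoA (t.filter pvIsBracket) st = pvGoA t st := by
  induction t with
  | nil => intro st; rfl
  | cons c rest ih =>
      intro st
      by_cases hb : pvIsBracket c = true
      · simp only [List.filter_cons, hb, if_pos]
        by_cases ho : pvIsOpen c = true
        · simp [pvGoA, ho, ih]
        · by_cases hc : pvIsClose c = true
          · cases st with
            | nil => simp [pvGoA, ho, hc]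
            | cons top st' => by_cases he : c = top <;> simp [pvGoA, ho, hc, he, ih]
          · simp [pvGoA, ho, hc, ih]
      · have ho : pvIsOpen c = false := by
          revert hb; simp [pvIsBracket, pvIsOpen]; tauto
        have hc : pvIsClose c = false := by
          revert hb; simp [pvIsBracket, pvIsClose]; tauto
        simp only [List.filter_cons, hb]
        simp [pvGoA, ho, hc, ih]

theorem pvRemovePairs_all {p : Char → Bool} (t : List Char) (h : t.all p = true) :
    (pvRemovePairs t).all p = true := by
  induction t using pvRemovePairs.induct with
  | case1 => simp [pvRemovePairs]
  | case2 => simpa [pvRemovePairs] using h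
  | case3 a b rest hp ih =>
      simp only [pvRemovePairs, if_pos hp]
      simp only [List.all_cons, Bool.and_eq_true] at h
      exact ih h.2.2
  | case4 a b rest hp ih =>
      simp only [pvRemovePairs, if_neg hp]
      simp only [List.all_cons, Bool.and_eq_true] at h ⊢
      exact ⟨h.1, ih (by simp only [List.all_cons, Bool.and_eq_true]; exact h.2)⟩

-- an irreducible accepted bracket list is exactly the stack of pending closers
theorem pvIrred_goA (t : List Char) : ∀ st, t.all pvIsBracket = true →
    pvRemovePairs t = t → pvGoA t st = true → t = st := by
  induction t with
  | nil =>
      intro st _ _ hg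
      simp [pvGoA] at hg
      simp [hg]
  | cons c rest ih =>
      intro st hall hirr hg
      have hrest : pvRemovePairs rest = rest := by
        cases rest with
        | nil => rfl
        | cons b r =>
            by_cases hp : pvIsPair c b = true
            · exfalso
              simp only [pvRemovePairs, if_pos hp] at hirr
              have h1 := pvRemovePairs_length_le r
              have h2 := congrArg List.length hirr
              simp at h2; omega
            · simp only [pvRemovePairs, if_neg hp] at hirr
              exact (List.cons.injEq _ _ _ _ ▸ hirr).2
      simp at hall
      by_cases ho : pvIsOpen c = true
      · simp only [pvGoA, if_pos ho] at hg
        have := ih (pvCloser c :: st) (by simpa using hall.2) hrest hg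
        exfalso
        have hp : pvIsPair c (pvCloser c) = true := by
          simp only [pvIsOpen, Bool.or_eq_true, decide_eq_true_eq] at ho
          rcases ho with (h | h) | h <;> subst h <;> decide
        rw [this] at hirr
        simp only [pvRemovePairs, if_pos hp] at hirr
        have h1 := pvRemovePairs_length_le st
        have h2 := congrArg List.length hirr
        simp at h2; omega
      · by_cases hc : pvIsClose c = true
        · cases st with
          | nil => simp [pvGoA, ho, hc] at hg
          | cons top st' =>
              by_cases he : c = top
              · subst he
                simp [pvGoA, ho, hc] at hg
                have := ih st' (by simpa using hall.2) hrest hg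
                rw [this]
              · simp [pvGoA, ho, hc, he] at hg
        · exfalso
          revert ho hc
          have := hall.1
          revert this
          simp [pvIsBracket, pvIsOpen, pvIsClose]
          tauto

theorem pvReduce_eq_goA (t : List Char) (hall : t.all pvIsBracket = true) :
    pvReduce t = pvGoA t [] := by
  induction t using pvReduce.induct with
  | case1 t h ih =>
      rw [pvReduce, dif_pos h, ih (pvRemovePairs_all t hall), pvGoA_removePairs]
  | case2 t h =>
      rw [pvReduce, dif_neg h]
      have hirr := pvRemovePairs_eq_of_length t h
      cases t with
      | nil => rfl
      | cons c rest =>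
          simp only [List.isEmpty_cons]
          cases hg : pvGoA (c :: rest) [] with
          | false => rfl
          | true => exact absurd (pvIrred_goA (c :: rest) [] hall hirr hg) (by simp)

-- ===== VERDICT (by name: the statement is the Claim_ definition above) =====
theorem validate_brackets_spec : Claim_equal_validate_brackets := by
  intro s _hd
  unfold Spec_validate_brackets validate_brackets validate_brackets_alt
  by_cases hs : s = ""
  · subst hs
    have h0 : ("".toList.filter pvIsBracket) = [] := rfl
    rw [if_pos rfl, h0, pvReduce]
    simp [pvRemovePairs]
  · rw [if_neg hs, pvReduce_eq_goA _ (by simp), pvGoA_filter]
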